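-- pv_equiv track=rewrite | github.com/xmp4660/IsoLeadToolkit | visualization/plotting/core.py | _get_pb_columns
-- ===== SOURCE A (Python) =====
-- def _get_pb_columns(columns: list[str]) -> tuple[str | None, str | None, str | None]:
--     """Find Pb isotope ratio columns with a best-effort heuristic."""
--     col_206 = "206Pb/204Pb" if "206Pb/204Pb" in columns else None
--     col_207 = "207Pb/204Pb" if "207Pb/204Pb" in columns else None
--     col_208 = "208Pb/204Pb" if "208Pb/204Pb" in columns else None
--
--     if col_206 and col_207 and col_208:
--         return col_206, col_207, col_208
--
--     for col in columns:
--         low = str(col).lower()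
--         if col_206 is None and "206" in low and "204" in low:
--             col_206 = col
--         if col_207 is None and "207" in low and "204" in low:
--             col_207 = col
--         if col_208 is None and "208" in low and "204" in low:
--             col_208 = col
--
--     return col_206, col_207, col_208
-- ===== SOURCE B (Python) =====
-- def _get_pb_columns(columns):
--     """Find Pb isotope ratio columns: exact name first, else first heuristic match."""
--     def find(exact, a, b):
--         if exact in columns:
--             return exact
--         return next((col for col in columns
--                      if a in str(col).lower() and b in str(col).lower()), None)
--     return (find("206Pb/204Pb", "206", "204"),
--             find("207Pb/204Pb", "207", "204"),
--             find("208Pb/204Pb", "208", "204"))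
-- ===== Notes on version B (the rewrite author's own statement) =====
-- stated objective: simpler
-- what changed: Replaces A's single interleaved pass that fills three slots at once (plus an early-return fast path) with one shared helper doing three independent short-circuiting first-match scans.
import Mathlib
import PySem

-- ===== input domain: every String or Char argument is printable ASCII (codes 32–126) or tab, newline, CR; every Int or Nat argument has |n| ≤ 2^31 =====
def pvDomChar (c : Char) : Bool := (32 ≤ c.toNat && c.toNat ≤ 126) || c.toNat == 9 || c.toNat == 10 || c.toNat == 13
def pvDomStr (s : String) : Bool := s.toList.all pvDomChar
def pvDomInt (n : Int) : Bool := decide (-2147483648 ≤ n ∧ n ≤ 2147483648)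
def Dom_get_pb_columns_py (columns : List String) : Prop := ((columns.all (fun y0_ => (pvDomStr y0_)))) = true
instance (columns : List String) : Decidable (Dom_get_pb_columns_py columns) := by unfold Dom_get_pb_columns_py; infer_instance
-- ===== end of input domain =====

-- B replaces A's single interleaved three-slot scan (with early-return fast path)
-- by one shared helper doing three independent short-circuiting first-match scans (objective: simpler).


-- ===== PORT A =====
-- the loop 'for col in columns: …' filling the three slots in one pass
def pbLoopA : List String → Option String × Option String × Option String → Option String × Option String × Option String
  | [], s => s
  | col :: rest, (c6, c7, c8) =>
    let low := PySem.Str.lower col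
    let c6' := if c6 = none ∧ PySem.Str.isIn "206" low ∧ PySem.Str.isIn "204" low then some col else c6
    let c7' := if c7 = none ∧ PySem.Str.isIn "207" low ∧ PySem.Str.isIn "204" low then some col else c7
    let c8' := if c8 = none ∧ PySem.Str.isIn "208" low ∧ PySem.Str.isIn "204" low then some col else c8
    pbLoopA rest (c6', c7', c8')

def get_pb_columns_py (columns : List String) : Option String × Option String × Option String :=
  let c6 : Option String := if "206Pb/204Pb" ∈ columns then some "206Pb/204Pb" else none
  let c7 : Option String := if "207Pb/204Pb" ∈ columns then some "207Pb/204Pb" else none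
  let c8 : Option String := if "208Pb/204Pb" ∈ columns then some "208Pb/204Pb" else none
  -- 'if col_206 and col_207 and col_208': the slots hold nonempty strings, so truthiness = isSome
  if c6.isSome ∧ c7.isSome ∧ c8.isSome then (c6, c7, c8)
  else pbLoopA columns (c6, c7, c8)

-- ===== PORT B =====
def pbFind (exact a b : String) (columns : List String) : Option String :=
  if exact ∈ columns then some exact
  else columns.find? (fun col =>
    PySem.Str.isIn a (PySem.Str.lower col) && PySem.Str.isIn b (PySem.Str.lower col))

def get_pb_columns_py_alt (columns : List String) : Option String × Option String × Option String :=
  (pbFind "206Pb/204Pb" "206" "204" columns,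
   pbFind "207Pb/204Pb" "207" "204" columns,
   pbFind "208Pb/204Pb" "208" "204" columns)

-- ===== PRECONDITION & SPEC =====
def Spec_get_pb_columns_py (columns : List String) (out : Option String × Option String × Option String) : Prop := out = get_pb_columns_py_alt columns
instance (columns : List String) (out : Option String × Option String × Option String) : Decidable (Spec_get_pb_columns_py columns out) := by unfold Spec_get_pb_columns_py; infer_instance

-- ===== CLAIM (what is proved, stated in full; the proofs are below) =====
def Claim_equal_get_pb_columns_py : Prop := ∀ (columns : List String), Dom_get_pb_columns_py columns → Spec_get_pb_columns_py columns (get_pb_columns_py columns)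

-- ===== LEMMAS AND PROOFS =====

-- one slot of A's loop, in isolation
def pbFill (p : String → Bool) : List String → Option String → Option String
  | [], c => c
  | col :: rest, c => pbFill p rest (if c = none ∧ p col then some col else c)

def pbPred (a b : String) (col : String) : Bool :=
  PySem.Str.isIn a (PySem.Str.lower col) && PySem.Str.isIn b (PySem.Str.lower col)

-- A's loop acts on the three slots independently
theorem pbLoopA_eq_fill (cols : List String) (c6 c7 c8 : Option String) :
    pbLoopA cols (c6, c7, c8) =
      (pbFill (pbPred "206" "204") cols c6,
       pbFill (pbPred "207" "204") cols c7,
       pbFill (pbPred "208" "204") cols c8) := by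
  induction cols generalizing c6 c7 c8 with
  | nil => rfl
  | cons col rest ih =>
    show pbLoopA (col :: rest) (c6, c7, c8) = _
    rw [pbLoopA, ih]
    refine Prod.ext ?_ (Prod.ext ?_ ?_) <;> show pbFill _ rest _ = pbFill _ rest _ <;>
      congr 1 <;> simp [pbPred]

-- a fill from none is a first-match scan; from some it is a no-op
theorem pbFill_eq (p : String → Bool) (cols : List String) (c : Option String) :
    pbFill p cols c = (c.or (cols.find? p)) := by
  induction cols generalizing c with
  | nil => cases c <;> rfl
  | cons col rest ih =>
    cases c with
    | some x => simp [pbFill, ih]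
    | none =>
      by_cases h : p col = true
      · simp [pbFill, h, List.find?, ih]
      · simp [pbFill, h, List.find?, ih]

-- one slot of A (exact hit pre-filled, then the loop) is B's find
theorem slot_eq (exact a b : String) (cols : List String) :
    pbFill (pbPred a b) cols (if exact ∈ cols then some exact else none)
      = pbFind exact a b cols := by
  by_cases h : exact ∈ cols
  · rw [if_pos h, pbFill_eq, pbFind, if_pos h]; rfl
  · rw [if_neg h, pbFill_eq, pbFind, if_neg h]; rfl

-- ===== VERDICT (by name: the statement is the Claim_ definition above) =====
theorem get_pb_columns_py_spec : Claim_equal_get_pb_columns_py := by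
  intro columns _
  show get_pb_columns_py columns = get_pb_columns_py_alt columns
  unfold get_pb_columns_py get_pb_columns_py_alt
  rw [← slot_eq "206Pb/204Pb" "206" "204" columns,
      ← slot_eq "207Pb/204Pb" "207" "204" columns,
      ← slot_eq "208Pb/204Pb" "208" "204" columns]
  by_cases h6 : "206Pb/204Pb" ∈ columns <;>
  by_cases h7 : "207Pb/204Pb" ∈ columns <;>
  by_cases h8 : "208Pb/204Pb" ∈ columns <;>
    simp only [h6, h7, h8, Option.isSome_some, Option.isSome_none, and_true, and_false,
      if_pos, if_neg, not_false_eq_true, Bool.false_eq_true] <;>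
    (try rw [pbLoopA_eq_fill]) <;>
    refine Prod.ext ?_ (Prod.ext ?_ ?_) <;> simp [pbFill_eq]
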